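-- pv_equiv track=rewrite | github.com/stevenN1207/Taller-Diagramas | app.py | analizar_numero
-- ===== SOURCE A (Python) =====
-- def analizar_numero(cadena):
--     estados = ["stateDiagram-v2", "direction LR", "[*] --> 1"]
--     estado = 1
--     i = 0
--     tiene_decimal = False
--     tiene_exponente = False
--
--     if not cadena:
--         return "\n".join(estados), " Entrada vacía"
--
--     while i < len(cadena):
--         c = cadena[i]
--
--         if estado == 1 and c.isdigit():
--             estados.append(f"1 --> 2: {c}")
--             estado = 2
--
--         elif estado == 2 and c.isdigit():
--             estados.append(f"2 --> 2: {c}")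
--
--         elif estado in [2] and c == '.' and not tiene_decimal:
--             estados.append(f"2 --> 3: {c}")
--             estado = 3
--             tiene_decimal = True
--
--         elif estado == 3 and c.isdigit():
--             estados.append(f"3 --> 4: {c}")
--             estado = 4
--
--         elif estado == 4 and c.isdigit():
--             estados.append(f"4 --> 4: {c}")
--
--         elif estado in [2, 4] and c in 'Ee' and not tiene_exponente:
--             estados.append(f"{estado} --> 5: {c}")
--             estado = 5
--             tiene_exponente = True
--
--         elif estado == 5 and c in '+-':
--             estados.append(f"5 --> 6: {c}")
--             estado = 6
--
--         elif estado in [5, 6] and c.isdigit():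
--             estados.append(f"{estado} --> 7: {c}")
--             estado = 7
--
--         elif estado == 7 and c.isdigit():
--             estados.append(f"7 --> 7: {c}")
--
--         else:
--             estados.append(f"{estado} --> 9: {c}")
--             estados.append("9 --> [*]")
--             return "\n".join(estados), f" \"{cadena}\" no es un número válido. Error con: \"{c}\""
--
--         i += 1
--
--     estados.append(f"{estado} --> 8: (otro)")
--     estados.append("8 --> [*]")
--     return "\n".join(estados), f" \"{cadena}\" es un número válido"
-- ===== SOURCE B (Python) =====
-- # B: grammar-directed staged parse — the number is split into runs (integer
-- # digits, optional '.'+fraction digits, optional 'Ee'+sign+exponent digits)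
-- # scanned stage by stage, and the diagram lines are generated in bulk per run,
-- # instead of A's per-character state-machine dispatch loop.
-- def analizar_numero(cadena):
--     lineas = ["stateDiagram-v2", "direction LR", "[*] --> 1"]
--     if not cadena:
--         return "\n".join(lineas), " Entrada vacía"
--
--     def fail(estado, c):
--         lineas.append(f"{estado} --> 9: {c}")
--         lineas.append("9 --> [*]")
--         return "\n".join(lineas), f" \"{cadena}\" no es un número válido. Error con: \"{c}\""
--
--     def ok(estado):
--         lineas.append(f"{estado} --> 8: (otro)")
--         lineas.append("8 --> [*]")
--         return "\n".join(lineas), f" \"{cadena}\" es un número válido"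
--
--     def run_end(i):  # end of the digit run starting at i
--         while i < len(cadena) and cadena[i].isdigit():
--             i += 1
--         return i
--
--     # stage 1: integer part  (1 --digit--> 2 --digit--> 2 ...)
--     if not cadena[0].isdigit():
--         return fail(1, cadena[0])
--     i = run_end(1)
--     lineas.append(f"1 --> 2: {cadena[0]}")
--     lineas.extend(f"2 --> 2: {c}" for c in cadena[1:i])
--     estado = 2
--
--     # stage 2: optional fraction  (2 --.--> 3 [--digit--> 4 --digit--> 4 ...])
--     if i < len(cadena) and cadena[i] == '.':
--         lineas.append(f"2 --> 3: {cadena[i]}")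
--         estado, i = 3, i + 1
--         j = run_end(i)
--         if j > i:
--             lineas.append(f"3 --> 4: {cadena[i]}")
--             lineas.extend(f"4 --> 4: {c}" for c in cadena[i + 1:j])
--             estado, i = 4, j
--
--     # stage 3: optional exponent  ({2,4} --Ee--> 5 [--+- --> 6] [--digit--> 7 ...])
--     if i < len(cadena) and cadena[i] in 'Ee' and estado in (2, 4):
--         lineas.append(f"{estado} --> 5: {cadena[i]}")
--         estado, i = 5, i + 1
--         if i < len(cadena) and cadena[i] in '+-':
--             lineas.append(f"5 --> 6: {cadena[i]}")
--             estado, i = 6, i + 1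
--         j = run_end(i)
--         if j > i:
--             lineas.append(f"{estado} --> 7: {cadena[i]}")
--             lineas.extend(f"7 --> 7: {c}" for c in cadena[i + 1:j])
--             estado, i = 7, j
--
--     # anything left over is the error character; else accept
--     if i < len(cadena):
--         return fail(estado, cadena[i])
--     return ok(estado)
-- ===== Notes on version B (the rewrite author's own statement) =====
-- stated objective: alternative
-- what changed: Replaces A's per-character state-machine dispatch loop by a grammar-directed staged parse: the string is split into runs (integer digits, optional '.'+fraction digits, optional 'Ee'+sign+exponent digits) scanned stage by stage, with the diagram lines generated in bulk per run and a single trailing check producing the error/accept tail.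
import Mathlib
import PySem

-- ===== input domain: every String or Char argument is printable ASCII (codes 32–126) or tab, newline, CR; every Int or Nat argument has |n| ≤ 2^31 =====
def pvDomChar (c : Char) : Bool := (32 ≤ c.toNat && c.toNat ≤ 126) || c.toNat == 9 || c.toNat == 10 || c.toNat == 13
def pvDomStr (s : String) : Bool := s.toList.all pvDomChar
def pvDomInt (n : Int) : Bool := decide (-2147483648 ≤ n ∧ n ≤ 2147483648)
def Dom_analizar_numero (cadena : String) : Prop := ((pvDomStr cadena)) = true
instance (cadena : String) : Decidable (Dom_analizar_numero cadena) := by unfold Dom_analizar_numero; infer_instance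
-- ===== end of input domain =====

-- B replaces A's per-character state-machine loop by a grammar-directed staged parse
-- (integer run, optional fraction run, optional exponent run) that emits the diagram
-- lines in bulk per run (objective: alternative decomposition, same cost).


-- ===== PORT A =====
-- c.isdigit() on a single character (PySem.Chars.isdigit is the Python char-class test)
def pyIsDigit (c : Char) : Bool := PySem.Chars.isdigit c

-- A's while-loop, one recursive call per index step; state = (estado, tiene_decimal, tiene_exponente, estados)
def analizarLoopA (cadena : String) (cs : List Char) (estado : Int)
    (tiene_decimal tiene_exponente : Bool) (estados : List String) : String × String :=
  match cs with
  | [] =>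
      (String.intercalate "\n" (estados ++ [PySem.Int.toStr estado ++ " --> 8: (otro)", "8 --> [*]"]),
       " \"" ++ cadena ++ "\" es un número válido")
  | c :: rest =>
      if estado == 1 && pyIsDigit c then
        analizarLoopA cadena rest 2 tiene_decimal tiene_exponente (estados ++ ["1 --> 2: " ++ String.singleton c])
      else if estado == 2 && pyIsDigit c then
        analizarLoopA cadena rest estado tiene_decimal tiene_exponente (estados ++ ["2 --> 2: " ++ String.singleton c])
      else if estado == 2 && c == '.' && !tiene_decimal then
        analizarLoopA cadena rest 3 true tiene_exponente (estados ++ ["2 --> 3: " ++ String.singleton c])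
      else if estado == 3 && pyIsDigit c then
        analizarLoopA cadena rest 4 tiene_decimal tiene_exponente (estados ++ ["3 --> 4: " ++ String.singleton c])
      else if estado == 4 && pyIsDigit c then
        analizarLoopA cadena rest estado tiene_decimal tiene_exponente (estados ++ ["4 --> 4: " ++ String.singleton c])
      else if (estado == 2 || estado == 4) && (c == 'E' || c == 'e') && !tiene_exponente then
        analizarLoopA cadena rest 5 tiene_decimal true
          (estados ++ [PySem.Int.toStr estado ++ " --> 5: " ++ String.singleton c])
      else if estado == 5 && (c == '+' || c == '-') then
        analizarLoopA cadena rest 6 tiene_decimal tiene_exponente (estados ++ ["5 --> 6: " ++ String.singleton c])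
      else if (estado == 5 || estado == 6) && pyIsDigit c then
        analizarLoopA cadena rest 7 tiene_decimal tiene_exponente
          (estados ++ [PySem.Int.toStr estado ++ " --> 7: " ++ String.singleton c])
      else if estado == 7 && pyIsDigit c then
        analizarLoopA cadena rest estado tiene_decimal tiene_exponente (estados ++ ["7 --> 7: " ++ String.singleton c])
      else
        (String.intercalate "\n" (estados ++ [PySem.Int.toStr estado ++ " --> 9: " ++ String.singleton c, "9 --> [*]"]),
         " \"" ++ cadena ++ "\" no es un número válido. Error con: \"" ++ String.singleton c ++ "\"")

def analizar_numero (cadena : String) : String × String :=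
  if cadena.toList.isEmpty then
    (String.intercalate "\n" ["stateDiagram-v2", "direction LR", "[*] --> 1"], " Entrada vacía")
  else
    analizarLoopA cadena cadena.toList 1 false false ["stateDiagram-v2", "direction LR", "[*] --> 1"]

-- ===== PORT B =====
-- the bulk line generation for one digit run: one line per character of the run
def repLines (pre : String) (cs : List Char) : List String := cs.map (fun c => pre ++ String.singleton c)

-- B's local fail(estado, c)
def altFail (cadena : String) (estado : Int) (c : Char) (lineas : List String) : String × String :=
  (String.intercalate "\n" (lineas ++ [PySem.Int.toStr estado ++ " --> 9: " ++ String.singleton c, "9 --> [*]"]),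
   " \"" ++ cadena ++ "\" no es un número válido. Error con: \"" ++ String.singleton c ++ "\"")

-- B's local ok(estado)
def altOk (cadena : String) (estado : Int) (lineas : List String) : String × String :=
  (String.intercalate "\n" (lineas ++ [PySem.Int.toStr estado ++ " --> 8: (otro)", "8 --> [*]"]),
   " \"" ++ cadena ++ "\" es un número válido")

-- B's trailing check: leftover input is the error character, else accept
def altFinal (cadena : String) (rest : List Char) (estado : Int) (lineas : List String) : String × String :=
  match rest with
  | [] => altOk cadena estado lineas
  | c :: _ => altFail cadena estado c lineas

-- exponent-digit run after 'Ee'(and optional sign): estado ∈ {5,6}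
def altDigits7 (cadena : String) (rest : List Char) (estado : Int) (lineas : List String) : String × String :=
  match rest.takeWhile pyIsDigit with
  | [] => altFinal cadena rest estado lineas
  | c :: ds => altFinal cadena (rest.dropWhile pyIsDigit) 7
      (lineas ++ [PySem.Int.toStr estado ++ " --> 7: " ++ String.singleton c] ++ repLines "7 --> 7: " ds)

-- after the 'Ee': optional sign, then the exponent digits
def altExpTail (cadena : String) (rest : List Char) (lineas : List String) : String × String :=
  match rest with
  | c :: rest' =>
      if c == '+' || c == '-' then
        altDigits7 cadena rest' 6 (lineas ++ ["5 --> 6: " ++ String.singleton c])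
      else altDigits7 cadena rest 5 lineas
  | [] => altDigits7 cadena [] 5 lineas

-- stage 3: optional exponent, entered with estado ∈ {2,3,4}
def altExpStage (cadena : String) (rest : List Char) (estado : Int) (lineas : List String) : String × String :=
  match rest with
  | c :: rest' =>
      if (c == 'E' || c == 'e') && (estado == 2 || estado == 4) then
        altExpTail cadena rest' (lineas ++ [PySem.Int.toStr estado ++ " --> 5: " ++ String.singleton c])
      else altFinal cadena rest estado lineas
  | [] => altFinal cadena [] estado lineas

-- stage 2: optional fraction ('.'+digit run), entered with estado = 2
def altFrac (cadena : String) (rest : List Char) (lineas : List String) : String × String :=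
  match rest with
  | c :: rest' =>
      if c == '.' then
        let lineas := lineas ++ ["2 --> 3: " ++ String.singleton c]
        match rest'.takeWhile pyIsDigit with
        | [] => altExpStage cadena rest' 3 lineas
        | d :: ds => altExpStage cadena (rest'.dropWhile pyIsDigit) 4
            (lineas ++ ["3 --> 4: " ++ String.singleton d] ++ repLines "4 --> 4: " ds)
      else altExpStage cadena rest 2 lineas
  | [] => altExpStage cadena [] 2 lineas

def analizar_numero_alt (cadena : String) : String × String :=
  let lineas := ["stateDiagram-v2", "direction LR", "[*] --> 1"]
  match cadena.toList with
  | [] => (String.intercalate "\n" lineas, " Entrada vacía")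
  | c :: rest =>
      -- stage 1: the integer digit run
      if pyIsDigit c then
        altFrac cadena (rest.dropWhile pyIsDigit)
          (lineas ++ ["1 --> 2: " ++ String.singleton c] ++ repLines "2 --> 2: " (rest.takeWhile pyIsDigit))
      else altFail cadena 1 c lineas

-- ===== PRECONDITION & SPEC =====
def Spec_analizar_numero (cadena : String) (out : String × String) : Prop := out = analizar_numero_alt cadena
instance (cadena : String) (out : String × String) : Decidable (Spec_analizar_numero cadena out) := by unfold Spec_analizar_numero; infer_instance

-- ===== CLAIM (what is proved, stated in full; the proofs are below) =====
def Claim_equal_analizar_numero : Prop := ∀ (cadena : String), Dom_analizar_numero cadena → Spec_analizar_numero cadena (analizar_numero cadena)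

-- ===== LEMMAS AND PROOFS =====

theorem loop7 (cadena : String) (cs : List Char) : ∀ (td te : Bool) (lineas : List String),
    analizarLoopA cadena cs 7 td te lineas =
      altFinal cadena (cs.dropWhile pyIsDigit) 7 (lineas ++ repLines "7 --> 7: " (cs.takeWhile pyIsDigit)) := by
  induction cs with
  | nil => intro td te lineas; simp [analizarLoopA, altFinal, altOk, repLines]
  | cons c rest ih =>
    intro td te lineas
    by_cases hd : pyIsDigit c = true <;>
      simp [analizarLoopA, altFinal, altFail, altOk, repLines, hd, ih, List.append_assoc]

theorem loop6 (cadena : String) (cs : List Char) (td te : Bool) (lineas : List String) :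
    analizarLoopA cadena cs 6 td te lineas = altDigits7 cadena cs 6 lineas := by
  cases cs with
  | nil => simp [analizarLoopA, altDigits7, altFinal, altOk]
  | cons c rest =>
    by_cases hd : pyIsDigit c = true <;>
      simp [analizarLoopA, altDigits7, altFinal, altFail, altOk, repLines, hd, loop7,
            List.append_assoc]

theorem loop5 (cadena : String) (cs : List Char) (td te : Bool) (lineas : List String) :
    analizarLoopA cadena cs 5 td te lineas = altExpTail cadena cs lineas := by
  cases cs with
  | nil => simp [analizarLoopA, altExpTail, altDigits7, altFinal, altOk]
  | cons c rest =>
    by_cases hp : (c == '+') = true <;> by_cases hm : (c == '-') = true <;>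
      by_cases hd : pyIsDigit c = true <;>
      simp [analizarLoopA, altExpTail, altDigits7, altFinal, altFail, altOk, repLines,
            hp, hm, hd, loop6, loop7, List.append_assoc]

theorem loop4 (cadena : String) (cs : List Char) : ∀ (td : Bool) (lineas : List String),
    analizarLoopA cadena cs 4 td false lineas =
      altExpStage cadena (cs.dropWhile pyIsDigit) 4 (lineas ++ repLines "4 --> 4: " (cs.takeWhile pyIsDigit)) := by
  induction cs with
  | nil => intro td lineas; simp [analizarLoopA, altExpStage, altFinal, altOk, repLines]
  | cons c rest ih =>
    intro td lineas
    by_cases hd : pyIsDigit c = true <;> by_cases hE : (c == 'E') = true <;>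
      by_cases he : (c == 'e') = true <;>
      simp [analizarLoopA, altExpStage, altExpTail, altFinal, altFail, altOk, repLines,
            hd, hE, he, ih, loop5, List.append_assoc]

theorem loop3 (cadena : String) (cs : List Char) (td : Bool) (lineas : List String) :
    analizarLoopA cadena cs 3 td false lineas =
      (match cs.takeWhile pyIsDigit with
       | [] => altExpStage cadena cs 3 lineas
       | d :: ds => altExpStage cadena (cs.dropWhile pyIsDigit) 4
           (lineas ++ ["3 --> 4: " ++ String.singleton d] ++ repLines "4 --> 4: " ds)) := by
  cases cs with
  | nil => simp [analizarLoopA, altExpStage, altFinal, altOk]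
  | cons c rest =>
    by_cases hd : pyIsDigit c = true <;>
      simp [analizarLoopA, altExpStage, altExpTail, altFinal, altFail, altOk, repLines,
            hd, loop4, List.append_assoc]

theorem loop2 (cadena : String) (cs : List Char) : ∀ (lineas : List String),
    analizarLoopA cadena cs 2 false false lineas =
      altFrac cadena (cs.dropWhile pyIsDigit) (lineas ++ repLines "2 --> 2: " (cs.takeWhile pyIsDigit)) := by
  induction cs with
  | nil => intro lineas; simp [analizarLoopA, altFrac, altExpStage, altFinal, altOk, repLines]
  | cons c rest ih =>
    intro lineas
    by_cases hd : pyIsDigit c = true <;> by_cases hp : (c == '.') = true <;>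
      by_cases hE : (c == 'E') = true <;> by_cases he : (c == 'e') = true <;>
      simp [analizarLoopA, altFrac, altExpStage, altExpTail, altFinal, altFail, altOk, repLines,
            hd, hp, hE, he, ih, loop3, loop5, List.append_assoc]

-- ===== VERDICT (by name: the statement is the Claim_ definition above) =====
theorem analizar_numero_spec : Claim_equal_analizar_numero := by
  intro cadena _
  unfold Spec_analizar_numero analizar_numero analizar_numero_alt
  cases cadena.toList with
  | nil => simp
  | cons c rest =>
    by_cases hd : pyIsDigit c = true <;>
      simp [analizarLoopA, altFail, hd, loop2]
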